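-- pv_equiv track=rewrite | github.com/MedScan-AI/MedScan_ai | DataPipeline/scripts/RAG/scraper.py | strip_references
-- ===== SOURCE A (Python) =====
-- REFERENCE_HEADINGS = [
--     "references",
--     "bibliography",
--     "works cited",
--     "reference",
--     "literature cited"
-- ]
--
-- def strip_references(text):
--     lower = text.lower()
--     min_index = None
--     for h in REFERENCE_HEADINGS:
--         for sep in ["\n", "\r\n"]:
--             idx = lower.find(sep + h)
--             if idx != -1 and (min_index is None or idx < min_index):
--                 min_index = idx
--         idx = lower.find(h + "\n")
--         if idx != -1 and (min_index is None or idx < min_index):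
--             min_index = idx
--     return text[:min_index].strip() if min_index is not None else text.strip()
-- ===== SOURCE B (Python) =====
-- REFERENCE_HEADINGS = [
--     "references",
--     "bibliography",
--     "works cited",
--     "reference",
--     "literature cited"
-- ]
--
-- def strip_references(text):
--     lower = text.lower()
--     pats = []
--     for h in REFERENCE_HEADINGS:
--         pats += ["\n" + h, "\r\n" + h, h + "\n"]
--     for i in range(len(lower)):
--         if any(lower.startswith(p, i) for p in pats):
--             return text[:i].strip()
--     return text.strip()
-- ===== Notes on version B (the rewrite author's own statement) =====
-- stated objective: alternative
-- what changed: A runs fifteen separate str.find scans (one per heading/separator pattern) and takes the minimum index; B builds the pattern list once and makes a single left-to-right scan over the text, returning at the first position where any pattern starts.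
import Mathlib
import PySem

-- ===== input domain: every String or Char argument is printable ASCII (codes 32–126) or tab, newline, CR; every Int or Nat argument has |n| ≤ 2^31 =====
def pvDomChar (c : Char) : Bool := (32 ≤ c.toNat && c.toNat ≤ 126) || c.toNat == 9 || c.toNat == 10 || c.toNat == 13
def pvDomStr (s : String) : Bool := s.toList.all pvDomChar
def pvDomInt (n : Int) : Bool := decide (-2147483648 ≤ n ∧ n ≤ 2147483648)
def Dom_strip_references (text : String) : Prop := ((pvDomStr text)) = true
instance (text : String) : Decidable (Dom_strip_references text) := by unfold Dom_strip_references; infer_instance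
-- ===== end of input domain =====

-- B replaces A's fifteen separate str.find scans (and taking their minimum) by ONE left-to-right
-- scan that stops at the first position where any heading pattern starts (objective: alternative).

def REFERENCE_HEADINGS : List String :=
  ["references", "bibliography", "works cited", "reference", "literature cited"]

-- ===== PORT A =====
-- the loop body 'if idx != -1 and (min_index is None or idx < min_index): min_index = idx'
def updateMinA (lower : List Char) (minIndex : Option Int) (pat : List Char) : Option Int :=
  let idx := PySem.Chars.find lower pat
  if idx = -1 then minIndex
  else
    match minIndex with
    | none => some idx
    | some m => if idx < m then some idx else some m

def strip_references (text : String) : String :=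
  let lower := PySem.Chars.lower text.toList
  let minIndex : Option Int :=
    REFERENCE_HEADINGS.foldl (fun minIndex h =>
      let minIndex :=
        [['\n'], ['\r', '\n']].foldl (fun minIndex sep => updateMinA lower minIndex (sep ++ h.toList)) minIndex
      updateMinA lower minIndex (h.toList ++ ['\n'])) none
  match minIndex with
  | some m => String.ofList (PySem.Chars.strip (PySem.List.slice text.toList none (some m)))
  | none => String.ofList (PySem.Chars.strip text.toList)

-- ===== PORT B =====
def bPatterns : List (List Char) :=
  REFERENCE_HEADINGS.flatMap (fun h =>
    [['\n'] ++ h.toList, ['\r', '\n'] ++ h.toList, h.toList ++ ['\n']])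

-- 'for i in range(len(lower)): if any(lower.startswith(p, i) for p in pats): return ...'
def firstHit (pats : List (List Char)) (i : Nat) : List Char → Option Nat
  | [] => none
  | c :: rest =>
      if pats.any (fun p => PySem.Chars.startswith (c :: rest) p) then some i
      else firstHit pats (i + 1) rest

def strip_references_alt (text : String) : String :=
  let lower := PySem.Chars.lower text.toList
  match firstHit bPatterns 0 lower with
  | some i => String.ofList (PySem.Chars.strip (PySem.List.slice text.toList none (some (i : Int))))
  | none => String.ofList (PySem.Chars.strip text.toList)

-- ===== PRECONDITION & SPEC =====
def Spec_strip_references (text : String) (out : String) : Prop := out = strip_references_alt text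
instance (text : String) (out : String) : Decidable (Spec_strip_references text out) := by unfold Spec_strip_references; infer_instance

-- ===== CLAIM (what is proved, stated in full; the proofs are below) =====
def Claim_equal_strip_references : Prop := ∀ (text : String), Dom_strip_references text → Spec_strip_references text (strip_references text)

-- ===== LEMMAS AND PROOFS =====

-- some pattern of `pats` occurs in `s` at position `j`
def OccAt (pats : List (List Char)) (s : List Char) (j : Nat) : Prop :=
  ∃ p ∈ pats, p <+: s.drop j

theorem occAt_append {pats : List (List Char)} {p s : List Char} {j : Nat} :
    OccAt (pats ++ [p]) s j ↔ OccAt pats s j ∨ p <+: s.drop j := by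
  simp [OccAt, or_and_right, exists_or]

-- A's accumulator invariant after processing the patterns `q`
def SpecA (q : List (List Char)) (s : List Char) (acc : Option Int) : Prop :=
  match acc with
  | none => ∀ j, ¬ OccAt q s j
  | some m => ∃ k : Nat, m = (k : Int) ∧ OccAt q s k ∧ ∀ j < k, ¬ OccAt q s j

theorem not_occAt_of_find_eq_neg_one {s p : List Char} (h : PySem.Chars.find s p = -1)
    (j : Nat) : ¬ p <+: s.drop j := by
  intro hp
  have hin : p <:+: s :=
    (PySem.Chars.isIn_iff_infix p s).mp ((PySem.Chars.exists_prefix_drop_iff_isIn p s).mp ⟨j, hp⟩)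
  exact ((PySem.Chars.find_eq_neg_one_iff s p).mp h) hin

theorem updateMinA_spec {q : List (List Char)} {s : List Char} {acc : Option Int} {p : List Char}
    (h : SpecA q s acc) : SpecA (q ++ [p]) s (updateMinA s acc p) := by
  unfold updateMinA
  by_cases hf : PySem.Chars.find s p = -1
  · simp only [hf, if_pos]
    match acc, h with
    | none, h =>
      intro j hocc
      rcases occAt_append.mp hocc with h' | h'
      · exact h j h'
      · exact not_occAt_of_find_eq_neg_one hf j h'
    | some m, ⟨k, hk, hocc, hmin⟩ =>
      refine ⟨k, hk, occAt_append.mpr (Or.inl hocc), ?_⟩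
      intro j hj hocc'
      rcases occAt_append.mp hocc' with h' | h'
      · exact hmin j hj h'
      · exact not_occAt_of_find_eq_neg_one hf j h'
  · have hge : 0 ≤ PySem.Chars.find s p := by
      have := PySem.Chars.neg_one_le_find s p
      omega
    obtain ⟨hpref, hfst⟩ := PySem.Chars.find_spec (s := s) (sub := p) hge
    simp only [hf]
    match acc, h with
    | none, h =>
      refine ⟨(PySem.Chars.find s p).toNat, by omega, occAt_append.mpr (Or.inr hpref), ?_⟩
      intro j hj hocc
      rcases occAt_append.mp hocc with h' | h'
      · exact h j h'
      · exact hfst j hj h'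
    | some m, ⟨k, hk, hocc, hmin⟩ =>
      by_cases hlt : PySem.Chars.find s p < m
      · simp only [if_pos hlt]
        refine ⟨(PySem.Chars.find s p).toNat, by omega, occAt_append.mpr (Or.inr hpref), ?_⟩
        intro j hj hocc'
        rcases occAt_append.mp hocc' with h' | h'
        · exact hmin j (by omega) h'
        · exact hfst j hj h'
      · simp only [if_neg hlt]
        refine ⟨k, hk, occAt_append.mpr (Or.inl hocc), ?_⟩
        intro j hj hocc'
        rcases occAt_append.mp hocc' with h' | h'
        · exact hmin j hj h'
        · exact hfst j (by omega) h'

theorem foldA_spec {s : List Char} (ps : List (List Char)) (q : List (List Char))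
    (acc : Option Int) (h : SpecA q s acc) :
    SpecA (q ++ ps) s (ps.foldl (updateMinA s) acc) := by
  induction ps generalizing q acc with
  | nil => simpa using h
  | cons p rest ih =>
    have := ih (q ++ [p]) (updateMinA s acc p) (updateMinA_spec h)
    simpa [List.append_assoc] using this

-- B's scan finds the least occurrence (patterns are nonempty, so no match beyond the end)
theorem firstHit_spec {pats : List (List Char)} (hne : ∀ p ∈ pats, p ≠ [])
    (t : List Char) : ∀ i : Nat,
    (firstHit pats i t = none → ∀ j, ¬ OccAt pats t j) ∧
    (∀ r, firstHit pats i t = some r →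
      i ≤ r ∧ OccAt pats t (r - i) ∧ ∀ j < r - i, ¬ OccAt pats t j) := by
  induction t with
  | nil =>
    intro i
    constructor
    · intro _ j ⟨p, hp, hpref⟩
      simp only [List.drop_nil] at hpref
      exact hne p hp (List.prefix_nil.mp hpref)
    · intro r hr; simp [firstHit] at hr
  | cons c rest ih =>
    intro i
    by_cases hany : pats.any (fun p => PySem.Chars.startswith (c :: rest) p) = true
    · constructor
      · intro hnone; simp [firstHit, hany] at hnone
      · intro r hr
        simp only [firstHit, hany, if_true, Option.some.injEq] at hr
        subst hr
        refine ⟨le_refl _, ?_, by omega⟩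
        rcases List.any_eq_true.mp hany with ⟨p, hp, hsw⟩
        exact ⟨p, hp, by simpa using (PySem.Chars.startswith_iff (c :: rest) p).mp hsw⟩
    · have hnoc0 : ¬ OccAt pats (c :: rest) 0 := by
        intro ⟨p, hp, hpref⟩
        exact hany (List.any_eq_true.mpr ⟨p, hp,
          (PySem.Chars.startswith_iff (c :: rest) p).mpr (by simpa using hpref)⟩)
      have hstep : firstHit pats i (c :: rest) = firstHit pats (i + 1) rest := by
        simp [firstHit, hany]
      have hshift : ∀ j : Nat, OccAt pats (c :: rest) (j + 1) ↔ OccAt pats rest j := by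
        intro j; simp [OccAt]
      constructor
      · intro hnone j
        rw [hstep] at hnone
        match j with
        | 0 => exact hnoc0
        | j + 1 => exact fun h => (ih (i + 1)).1 hnone j ((hshift j).mp h)
      · intro r hr
        rw [hstep] at hr
        obtain ⟨hle, hocc, hmin⟩ := (ih (i + 1)).2 r hr
        refine ⟨by omega, ?_, ?_⟩
        · have : r - i = (r - (i + 1)) + 1 := by omega
          rw [this]; exact (hshift _).mpr hocc
        · intro j hj
          match j with
          | 0 => exact hnoc0
          | j + 1 =>
            intro h
            exact hmin j (by omega) ((hshift j).mp h)

theorem bPatterns_nonempty : ∀ p ∈ bPatterns, p ≠ [] := by decide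

-- A's nested fold is the flat fold over bPatterns (both lists are literals)
theorem foldA_eq_flat (lower : List Char) :
    REFERENCE_HEADINGS.foldl (fun minIndex h =>
      let minIndex :=
        [['\n'], ['\r', '\n']].foldl (fun minIndex sep => updateMinA lower minIndex (sep ++ h.toList)) minIndex
      updateMinA lower minIndex (h.toList ++ ['\n'])) none
    = bPatterns.foldl (updateMinA lower) none := by
  simp [REFERENCE_HEADINGS, bPatterns, List.foldl, List.flatMap]

-- ===== VERDICT (by name: the statement is the Claim_ definition above) =====
theorem strip_references_spec : Claim_equal_strip_references := by
  intro text _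
  unfold Spec_strip_references strip_references strip_references_alt
  simp only [foldA_eq_flat]
  generalize PySem.Chars.lower text.toList = lower
  have hA : SpecA bPatterns lower (bPatterns.foldl (updateMinA lower) none) := by
    have h0 : SpecA [] lower none := by
      intro j hocc
      obtain ⟨p, hp, _⟩ := hocc
      simp at hp
    simpa using foldA_spec (s := lower) bPatterns [] none h0
  have hB := firstHit_spec bPatterns_nonempty lower 0
  cases hfold : bPatterns.foldl (updateMinA lower) none with
  | none =>
    rw [hfold] at hA
    cases hfh : firstHit bPatterns 0 lower with
    | none => rfl
    | some r =>
      obtain ⟨_, hocc, _⟩ := hB.2 r hfh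
      exact absurd hocc (hA _)
  | some m =>
    rw [hfold] at hA
    obtain ⟨k, hk, hoccA, hminA⟩ := hA
    cases hfh : firstHit bPatterns 0 lower with
    | none => exact absurd hoccA (hB.1 hfh k)
    | some r =>
      obtain ⟨_, hoccB, hminB⟩ := hB.2 r hfh
      rw [Nat.sub_zero] at hoccB
      have hkr : k = r := by
        rcases lt_trichotomy k r with h | h | h
        · exact absurd hoccA (hminB k (by omega))
        · exact h
        · exact absurd hoccB (hminA r h)
      subst hk; subst hkr
      rfl
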